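-- pv_equiv track=rewrite | github.com/seeger22/ner | preprocess.py | extraction_of_log1
-- ===== SOURCE A (Python) =====
-- def extraction_of_log1(lst):#in this case our log1 file (for train.txt) is a list of dictionaries
--     res={}
--     id=0
--     for i in range(0,len(lst)):
--         for elem in lst[i]:
--             if elem['text'] not in res:
--                 res[elem['text']]=id
--                 id+=1
--     return res
-- ===== SOURCE B (Python) =====
-- def extraction_of_log1(lst):
--     # Phase 1: record each text's FIRST-occurrence position by overwriting back-to-front
--     # (no membership test: the last write, coming from the smallest index, wins).
--     texts = [elem['text'] for row in lst for elem in row]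
--     pos = {t: i for i, t in reversed(list(enumerate(texts)))}
--     # Phase 2: sort the keys by first-occurrence position and rank them.
--     return {t: rank for rank, t in enumerate(sorted(pos, key=pos.get))}
-- ===== Notes on version B (the rewrite author's own statement) =====
-- stated objective: alternative
-- what changed: Replaces A's online pass (membership test + manual id counter) by a position-sort algorithm: record each text's first-occurrence index via a reverse-overwrite dict comprehension (no membership test), then sort the keys by that index and rank them with enumerate.
import Mathlib
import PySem

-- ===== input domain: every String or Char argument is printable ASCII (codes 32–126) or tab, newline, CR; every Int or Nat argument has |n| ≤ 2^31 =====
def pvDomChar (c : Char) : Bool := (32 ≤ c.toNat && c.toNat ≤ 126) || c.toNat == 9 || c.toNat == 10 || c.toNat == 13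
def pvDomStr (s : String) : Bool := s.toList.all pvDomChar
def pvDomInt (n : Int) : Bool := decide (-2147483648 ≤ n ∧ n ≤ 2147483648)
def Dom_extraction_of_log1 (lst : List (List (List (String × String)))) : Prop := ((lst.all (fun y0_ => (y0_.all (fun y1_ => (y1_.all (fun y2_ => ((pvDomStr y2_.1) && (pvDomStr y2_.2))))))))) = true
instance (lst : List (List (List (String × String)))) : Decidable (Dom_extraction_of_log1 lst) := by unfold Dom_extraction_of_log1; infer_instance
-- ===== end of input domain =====

-- B replaces A's online pass (membership test + manual id counter) by a position-sort
-- algorithm: first-occurrence indices via a reverse-overwrite dict, then sort keys by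
-- that index and rank them; an alternative of similar cost, not claimed faster.


-- ===== PORT A =====
-- elem['text'] raises KeyError when the key is absent; that case (the `none` branch, which
-- leaves the state unchanged) is excluded by Pre_ below.
def extraction_of_log1 (lst : List (List (List (String × String)))) : List (String × Int) :=
  (lst.foldl (fun st row =>
      row.foldl (fun st elem =>
        match (PySem.Dict.mk elem).get? "text" with
        | none => st
        | some t => if st.1.contains t then st else (st.1.insert t st.2, st.2 + 1)) st)
    ((PySem.Dict.empty : PySem.Dict String Int), (0 : Int))).1.items

-- ===== PORT B =====
-- e['text'] in the comprehension also raises KeyError on a missing 'text' key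
-- (filterMap's skip is outside Pre_); pos.get t is getD t 0 — every key of pos is present.
def extraction_of_log1_alt (lst : List (List (List (String × String)))) : List (String × Int) :=
  let texts := lst.flatMap (fun row => row.filterMap (fun e => (PySem.Dict.mk e).get? "text"))
  let pos := ((PySem.List.enumerate texts 0).reverse).foldl
      (fun d p => d.insert p.2 p.1) (PySem.Dict.empty : PySem.Dict String Int)
  (PySem.List.enumerate (PySem.List.sorted pos.keys (fun t => pos.getD t 0)) 0).map
    (fun p => (p.2, p.1))

-- ===== PRECONDITION & SPEC =====
-- Pre_: every inner dict has the key 'text' (otherwise both Pythons raise KeyError).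
def Pre_extraction_of_log1 (lst : List (List (List (String × String)))) : Prop :=
  ∀ row ∈ lst, ∀ e ∈ row, (PySem.Dict.mk e).contains "text" = true
instance (lst : List (List (List (String × String)))) : Decidable (Pre_extraction_of_log1 lst) := by unfold Pre_extraction_of_log1; infer_instance
def pvWitness_extraction_of_log1 : (List (List (List (String × String)))) :=
  [[[("text", "a"), ("tag", "O")], [("text", "b")]], [[("text", "a")]]]

def Spec_extraction_of_log1 (lst : List (List (List (String × String)))) (out : List (String × Int)) : Prop := out = extraction_of_log1_alt lst
instance (lst : List (List (List (String × String)))) (out : List (String × Int)) : Decidable (Spec_extraction_of_log1 lst out) := by unfold Spec_extraction_of_log1; infer_instance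

-- ===== CLAIM (what is proved, stated in full; the proofs are below) =====
def Claim_equal_extraction_of_log1 : Prop := ∀ (lst : List (List (List (String × String)))), Dom_extraction_of_log1 lst → Pre_extraction_of_log1 lst → Spec_extraction_of_log1 lst (extraction_of_log1 lst)

-- ===== LEMMAS AND PROOFS =====

-- A's loop step, on a text value
def pvStep (st : PySem.Dict String Int × Int) (t : String) : PySem.Dict String Int × Int :=
  if st.1.contains t then st else (st.1.insert t st.2, st.2 + 1)

-- the dict {t : i} built from a list of distinct texts, numbered from s
def pvNumbered (u : List String) (s : Int) : List (String × Int) :=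
  (PySem.List.enumerate u s).map (fun p => (p.2, p.1))

theorem pvNumbered_nil (s : Int) : pvNumbered [] s = [] := rfl

theorem pvNumbered_cons (t : String) (u : List String) (s : Int) :
    pvNumbered (t :: u) s = (t, s) :: pvNumbered u (s + 1) := by
  simp [pvNumbered, PySem.List.enumerate_cons]

theorem pvNumbered_append_singleton (u : List String) (t : String) (s : Int) :
    pvNumbered (u ++ [t]) s = pvNumbered u s ++ [(t, s + u.length)] := by
  induction u generalizing s with
  | nil => simp [pvNumbered_nil, pvNumbered_cons]
  | cons x xs ih => simp [pvNumbered_cons, ih]; ring_nf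

theorem pvContains_numbered (u : List String) (s : Int) (t : String) :
    (PySem.Dict.mk (pvNumbered u s)).contains t = u.contains t := by
  induction u generalizing s with
  | nil => rfl
  | cons x xs ih =>
    simp only [pvNumbered_cons, PySem.Dict.contains, List.any_cons,
      List.contains_cons] at *
    rw [← ih (s + 1), Bool.beq_comm]

theorem pvFoldl_step (ts : List String) (u : List String) :
    ts.foldl pvStep (PySem.Dict.mk (pvNumbered u 0), (u.length : Int)) =
      (PySem.Dict.mk (pvNumbered (PySem.Set.update u ts) 0),
       ((PySem.Set.update u ts).length : Int)) := by
  induction ts generalizing u with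
  | nil => simp [PySem.Set.update]
  | cons t ts ih =>
    have hupd : PySem.Set.update u (t :: ts) = PySem.Set.update (PySem.Set.add u t) ts := by
      simp [PySem.Set.update]
    rw [List.foldl_cons, hupd]
    by_cases h : u.contains t = true
    · have hc : (PySem.Dict.mk (pvNumbered u 0)).contains t = true := by
        rw [pvContains_numbered]; exact h
      have hstep : pvStep (PySem.Dict.mk (pvNumbered u 0), (u.length : Int)) t =
          (PySem.Dict.mk (pvNumbered u 0), (u.length : Int)) := by
        unfold pvStep; rw [hc]; simp
      have hadd : PySem.Set.add u t = u := by simp only [PySem.Set.add, PySem.Set.contains, h]; rfl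
      rw [hstep, hadd, ih]
    · have hc : (PySem.Dict.mk (pvNumbered u 0)).contains t = false := by
        rw [pvContains_numbered]; exact eq_false_of_ne_true h
      have hstep : pvStep (PySem.Dict.mk (pvNumbered u 0), (u.length : Int)) t =
          (PySem.Dict.mk (pvNumbered (u ++ [t]) 0), ((u ++ [t]).length : Int)) := by
        unfold pvStep; rw [hc]
        simp only [Bool.false_eq_true, if_false]
        refine Prod.ext ?_ ?_
        · apply PySem.Dict.ext
          rw [PySem.Dict.items_insert_of_not_contains _ _ hc]
          show pvNumbered u 0 ++ [(t, (u.length : Int))] = pvNumbered (u ++ [t]) 0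
          rw [pvNumbered_append_singleton]; simp
        · simp
      have hadd : PySem.Set.add u t = u ++ [t] := by
        simp only [PySem.Set.add, PySem.Set.contains, h]; simp
      rw [hstep, hadd, ih]

theorem pvInner_fold (row : List (List (String × String))) (st : PySem.Dict String Int × Int) :
    row.foldl (fun st elem =>
        match (PySem.Dict.mk elem).get? "text" with
        | none => st
        | some t => if st.1.contains t then st else (st.1.insert t st.2, st.2 + 1)) st =
      (row.filterMap (fun e => (PySem.Dict.mk e).get? "text")).foldl pvStep st := by
  induction row generalizing st with
  | nil => rfl
  | cons e row ih =>
    cases hg : (PySem.Dict.mk e).get? "text" with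
    | none => simp [List.foldl_cons, hg, ih]
    | some t => simp [List.foldl_cons, hg, ih, pvStep]

theorem pvOuter_fold (lst : List (List (List (String × String)))) (st : PySem.Dict String Int × Int) :
    lst.foldl (fun st row =>
        (row.filterMap (fun e => (PySem.Dict.mk e).get? "text")).foldl pvStep st) st =
      (lst.flatMap (fun row => row.filterMap (fun e => (PySem.Dict.mk e).get? "text"))).foldl pvStep st := by
  induction lst generalizing st with
  | nil => rfl
  | cons row lst ih => simp [List.flatMap_cons, List.foldl_append, ih]

-- B-side lemmas ------------------------------------------------------------

theorem pvMap_snd_enumerate (ts : List String) (s : Int) :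
    (PySem.List.enumerate ts s).map (·.2) = ts := by
  induction ts generalizing s with
  | nil => rfl
  | cons x t ih => simp [PySem.List.enumerate_cons, ih]

-- the reverse-overwrite fold maps each text to its FIRST index
theorem pvGet?_revFold (ts : List String) (s : Int) (d : PySem.Dict String Int) (t : String) :
    ((PySem.List.enumerate ts s).reverse.foldl
        (fun d p => d.insert p.2 p.1) d).get? t =
      if t ∈ ts then some (s + (List.idxOf t ts : Int)) else d.get? t := by
  induction ts generalizing s d with
  | nil => simp [PySem.List.enumerate]
  | cons x rest ih =>
    rw [PySem.List.enumerate_cons, List.reverse_cons, List.foldl_append]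
    simp only [List.foldl_cons, List.foldl_nil]
    rw [PySem.Dict.get?_insert, ih]
    by_cases hx : t = x
    · subst hx; simp [List.idxOf_cons_self]
    · simp only [hx, if_false, List.mem_cons]
      by_cases hm : t ∈ rest
      · simp only [hm, if_true]
        rw [List.idxOf_cons_ne _ (fun h => hx h.symm)]
        congr 1; push_cast; ring
      · simp [hm]

-- the ordered dedup is strictly increasing in first-occurrence index
theorem pvOfList_pairwise_idx (ts : List String) :
    (PySem.Set.ofList ts).Pairwise (fun a b => List.idxOf a ts < List.idxOf b ts) := by
  induction ts with
  | nil => simp [PySem.Set.ofList]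
  | cons x rest ih =>
    rw [PySem.Set.ofList_cons]
    refine List.Pairwise.cons ?_ ?_
    · intro b hb
      obtain ⟨hbmem, hbx⟩ := (PySem.Set.mem_discard _ _ _).mp hb
      rw [List.idxOf_cons_self, List.idxOf_cons_ne _ (fun h => hbx h.symm)]
      exact Nat.succ_pos _
    · have hsub : (PySem.Set.discard (PySem.Set.ofList rest) x).Sublist (PySem.Set.ofList rest) := by
        simp only [PySem.Set.discard]; exact List.filter_sublist
      have hp := ih.sublist hsub
      refine hp.imp_of_mem ?_
      intro a b ha hb hlt
      obtain ⟨_, hax⟩ := (PySem.Set.mem_discard _ _ _).mp ha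
      obtain ⟨_, hbx⟩ := (PySem.Set.mem_discard _ _ _).mp hb
      rw [List.idxOf_cons_ne _ (fun h => hax h.symm), List.idxOf_cons_ne _ (fun h => hbx h.symm)]
      exact Nat.succ_lt_succ hlt

-- ===== VERDICT (by name: the statement is the Claim_ definition above) =====
theorem extraction_of_log1_spec : Claim_equal_extraction_of_log1 := by
  intro lst _ _
  unfold Spec_extraction_of_log1 extraction_of_log1 extraction_of_log1_alt
  simp only []
  set texts := lst.flatMap (fun row => row.filterMap (fun e => (PySem.Dict.mk e).get? "text")) with htexts
  set pos := ((PySem.List.enumerate texts 0).reverse).foldl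
      (fun d p => d.insert p.2 p.1) (PySem.Dict.empty : PySem.Dict String Int) with hpos
  -- A's side reduces to the numbered ordered dedup
  have h0 : ((PySem.Dict.empty : PySem.Dict String Int), (0 : Int)) =
      (PySem.Dict.mk (pvNumbered [] 0), (([] : List String).length : Int)) := rfl
  simp only [pvInner_fold]
  rw [pvOuter_fold, h0, pvFoldl_step]
  -- B's side: the sorted key list IS the ordered dedup
  have hkeys : pos.keys = PySem.Set.ofList texts.reverse := by
    calc pos.keys
        = PySem.Set.update (PySem.Dict.empty : PySem.Dict String Int).keys
            (((PySem.List.enumerate texts 0).reverse).map (fun p : Int × String => p.2)) :=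
          PySem.Dict.keys_foldl_insert_key _ _ _ _
      _ = PySem.Set.ofList texts.reverse := by
          rw [PySem.Dict.keys_empty, List.map_reverse, pvMap_snd_enumerate,
            PySem.Set.update_nil_left]
  have hkey_eq : ∀ t ∈ texts, pos.getD t 0 = (List.idxOf t texts : Int) := by
    intro t ht
    rw [hpos, PySem.Dict.getD_eq_get?_getD, pvGet?_revFold]
    simp [ht]
  have hsorted : PySem.List.sorted pos.keys (fun t => pos.getD t 0) = PySem.Set.ofList texts := by
    rw [hkeys]
    apply PySem.List.sorted_eq_of_perm_of_pairwise_lt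
    · rw [List.perm_ext_iff_of_nodup (PySem.Set.nodup_ofList _) (PySem.Set.nodup_ofList _)]
      intro a
      simp [PySem.Set.mem_ofList]
    · refine (pvOfList_pairwise_idx texts).imp_of_mem ?_
      intro a b ha hb hlt
      have ha' : a ∈ texts := (PySem.Set.mem_ofList _ _).mp ha
      have hb' : b ∈ texts := (PySem.Set.mem_ofList _ _).mp hb
      rw [hkey_eq a ha', hkey_eq b hb']
      exact_mod_cast hlt
  rw [hsorted]
  -- both sides: pvNumbered of the ordered dedup
  show pvNumbered (PySem.Set.update [] texts) 0 = pvNumbered (PySem.Set.ofList texts) 0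
  rw [PySem.Set.update_nil_left]
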